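-- pv_equiv track=rewrite | github.com/ecastillo999/RetosKotlin2022Moure | Python/Challenge19.py | time_to_milisecond
-- ===== SOURCE A (Python) =====
-- def time_to_milisecond(days: int, hours: int, minutes: int, second: int):
--     """
--     Función que convierte valores de tiempo, en milisegundos. No considera los valores dados como fecha, por ende no hay
--     comprobación de ese formato.
--     """
--     # Si algñun valor dado es negativo, retorna None
--     if days < 0 or hours < 0 or minutes < 0 or second < 0:
--         return None
--
--     # Variables
--     conversion_list = [1000, 60, 60, 24]
--     times = [days, hours, minutes, second]
--     final_time = 0
--
--     # Por cada formato de tiempo, realiza la conversión a milisegundos y la suma al tiempo final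
--     for time in times:
--
--         # Variable de acumulación de tiempo
--         accum_time = time
--
--         # Por cada valor de conversión, realiza la multiplicación y acumulación del tiempo
--         for conversion in conversion_list:
--             accum_time *= conversion
--
--         # El tiempo ya en milisegundos, lo acumula a la variable final
--         final_time += accum_time
--
--         # Retira el último valor de la lista de conversión. Es una conveniencia debido a que todos los valores no se
--         # deben multiplicar por todos los valores de esa lista
--         conversion_list.pop()
--
--     return final_time
-- ===== SOURCE B (Python) =====
-- def time_to_milisecond(days: int, hours: int, minutes: int, second: int):
--     if days < 0 or hours < 0 or minutes < 0 or second < 0: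
--         return None
--     return days * 86400000 + hours * 3600000 + minutes * 60000 + second * 1000
-- ===== Notes on version B (the rewrite author's own statement) =====
-- stated objective: simpler
-- what changed: Replaces the nested loop over a shrinking conversion_list with a direct closed-form weighted sum using precomputed millisecond constants.
import Mathlib
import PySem

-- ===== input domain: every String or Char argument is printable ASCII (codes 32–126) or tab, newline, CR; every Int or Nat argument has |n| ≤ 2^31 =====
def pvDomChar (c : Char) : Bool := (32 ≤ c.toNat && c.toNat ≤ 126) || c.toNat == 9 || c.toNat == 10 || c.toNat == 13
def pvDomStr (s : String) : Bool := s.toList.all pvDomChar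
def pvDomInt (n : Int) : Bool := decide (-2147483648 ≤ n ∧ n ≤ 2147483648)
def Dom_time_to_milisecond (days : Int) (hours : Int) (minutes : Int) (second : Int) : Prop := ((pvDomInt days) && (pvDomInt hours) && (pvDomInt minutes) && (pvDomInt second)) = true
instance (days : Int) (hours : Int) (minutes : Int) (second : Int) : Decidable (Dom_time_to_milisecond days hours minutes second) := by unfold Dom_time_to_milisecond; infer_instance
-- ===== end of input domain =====

-- ===== PORT A =====
-- B replaces A's nested accumulation loop over a shrinking conversion_list with one closed-form weighted sum (objective: simpler).
-- literal port of A: the for-loop over times carries (conversion_list, final_time); the inner loop is a foldl product; pop drops the last element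
def time_to_milisecond (days : Int) (hours : Int) (minutes : Int) (second : Int) : Option Int :=
  if days < 0 || hours < 0 || minutes < 0 || second < 0 then none
  else
    let conversion_list : List Int := [1000, 60, 60, 24]
    let times : List Int := [days, hours, minutes, second]
    let final_time : Int := 0
    let res := times.foldl (fun (st : List Int × Int) time =>
      let accum_time := st.1.foldl (fun a c => a * c) time
      (st.1.dropLast, st.2 + accum_time)) (conversion_list, final_time)
    some res.2

-- ===== PORT B =====
def time_to_milisecond_alt (days : Int) (hours : Int) (minutes : Int) (second : Int) : Option Int :=
  if days < 0 || hours < 0 || minutes < 0 || second < 0 then none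
  else some (days * 86400000 + hours * 3600000 + minutes * 60000 + second * 1000)

-- ===== PRECONDITION & SPEC =====
def Spec_time_to_milisecond (days : Int) (hours : Int) (minutes : Int) (second : Int) (out : Option Int) : Prop := out = time_to_milisecond_alt days hours minutes second
instance (days : Int) (hours : Int) (minutes : Int) (second : Int) (out : Option Int) : Decidable (Spec_time_to_milisecond days hours minutes second out) := by unfold Spec_time_to_milisecond; infer_instance

-- ===== CLAIM (what is proved, stated in full; the proofs are below) =====
def Claim_equal_time_to_milisecond : Prop := ∀ (days : Int) (hours : Int) (minutes : Int) (second : Int), Dom_time_to_milisecond days hours minutes second → Spec_time_to_milisecond days hours minutes second (time_to_milisecond days hours minutes second)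

-- ===== LEMMAS AND PROOFS =====

-- ===== VERDICT (by name: the statement is the Claim_ definition above) =====
theorem time_to_milisecond_spec : Claim_equal_time_to_milisecond := by
  intro days hours minutes second _
  unfold Spec_time_to_milisecond time_to_milisecond time_to_milisecond_alt
  split
  · rfl
  · simp only [List.foldl, List.dropLast]
    congr 1
    ring
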